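-- pv_equiv track=rewrite | github.com/chengcz/bixcode-snippets | geneFamily/itol.py | __features2visible
-- ===== SOURCE A (Python) =====
-- def __features2visible(features):
--     shapes = [
--         'RE', 'HH', 'HV', 'EL', 'DI', 'TR', 'TL', 'PL', 'PR', 'PU', 'PD', 'OC', 'GP'
--     ]
--     colors = [
--         "#377EB8", "#4DAF4A", "#FFD92F", "#E78AC3", "#A6D854",
--         "#8DA0CB", "#FC8D62", "#66C2A5", "#E6AB02", "#66A61E",
--         "#E7298A", "#7570B3", "#D95F02", "#1B9E77", "#F781BF",
--         "#FFFF33", "#FF7F00", "#984EA3",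
--     ]
--     while len(shapes) < len(features):
--         shapes = shapes * 2
--     while len(colors) < len(features):
--         colors = colors * 2
--     assert len(features) <= min(len(shapes), len(colors))
--     feature = {i[0]: i[1:] for i in zip(features, shapes, colors)}
--     return feature
-- ===== SOURCE B (Python) =====
-- def __features2visible(features):
--     shapes = [
--         'RE', 'HH', 'HV', 'EL', 'DI', 'TR', 'TL', 'PL', 'PR', 'PU', 'PD', 'OC', 'GP'
--     ]
--     colors = [
--         "#377EB8", "#4DAF4A", "#FFD92F", "#E78AC3", "#A6D854",
--         "#8DA0CB", "#FC8D62", "#66C2A5", "#E6AB02", "#66A61E",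
--         "#E7298A", "#7570B3", "#D95F02", "#1B9E77", "#F781BF",
--         "#FFFF33", "#FF7F00", "#984EA3",
--     ]
--     return {f: (shapes[i % len(shapes)], colors[i % len(colors)])
--             for i, f in enumerate(features)}
-- ===== Notes on version B (the rewrite author's own statement) =====
-- stated objective: idiomatic
-- what changed: Replaced the two list-doubling while loops and the assert with direct modular indexing shapes[i % 13] / colors[i % 18] in a single enumerate-driven dict comprehension (element j of a repeatedly doubled list is original[j % len]).
import Mathlib
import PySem

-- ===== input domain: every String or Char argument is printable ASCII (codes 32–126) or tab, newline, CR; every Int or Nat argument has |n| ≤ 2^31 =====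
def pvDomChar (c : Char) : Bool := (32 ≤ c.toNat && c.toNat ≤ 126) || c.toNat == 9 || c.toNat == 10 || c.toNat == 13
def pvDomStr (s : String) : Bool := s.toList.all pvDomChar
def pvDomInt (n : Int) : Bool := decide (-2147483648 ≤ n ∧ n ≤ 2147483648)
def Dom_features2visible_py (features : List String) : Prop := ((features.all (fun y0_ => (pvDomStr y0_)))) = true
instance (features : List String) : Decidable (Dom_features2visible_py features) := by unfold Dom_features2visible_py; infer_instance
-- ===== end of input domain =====

-- B replaces A's palette-doubling while loops by modular indexing in one comprehension (idiomatic, O(1) extra space).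

-- ===== PORT A =====
def pvShapes : List String :=
  ["RE", "HH", "HV", "EL", "DI", "TR", "TL", "PL", "PR", "PU", "PD", "OC", "GP"]
def pvColors : List String :=
  ["#377EB8", "#4DAF4A", "#FFD92F", "#E78AC3", "#A6D854",
   "#8DA0CB", "#FC8D62", "#66C2A5", "#E6AB02", "#66A61E",
   "#E7298A", "#7570B3", "#D95F02", "#1B9E77", "#F781BF",
   "#FFFF33", "#FF7F00", "#984EA3"]

-- 'while len(l) < n: l = l * 2'; the l ≠ [] guard only makes the recursion total
-- (both call sites pass a nonempty literal palette)
def pvDouble (l : List String) (n : Nat) : List String :=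
  if h : l ≠ [] ∧ l.length < n then pvDouble (l ++ l) n else l
termination_by n - l.length
decreasing_by
  have hl : l.length ≠ 0 := by simpa [List.length_eq_zero_iff] using h.1
  simp only [List.length_append]; omega

def features2visible_py (features : List String) : List (String × String × String) :=
  let shapes := pvDouble pvShapes features.length
  let colors := pvDouble pvColors features.length
  -- assert always succeeds after the loops; {i[0]: i[1:] for i in zip(features, shapes, colors)}
  ((features.zip (shapes.zip colors)).foldl
    (fun d p => d.insert p.1 p.2) (PySem.Dict.empty : PySem.Dict String (String × String))).items

-- ===== PORT B =====
def features2visible_py_alt (features : List String) : List (String × String × String) :=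
  ((PySem.List.enumerate features 0).foldl
    (fun d p => d.insert p.2
      (PySem.List.pyGetD pvShapes (PySem.Int.mod p.1 (pvShapes.length : Int)) "",
       PySem.List.pyGetD pvColors (PySem.Int.mod p.1 (pvColors.length : Int)) ""))
    (PySem.Dict.empty : PySem.Dict String (String × String))).items

-- ===== PRECONDITION & SPEC =====
def Spec_features2visible_py (features : List String) (out : List (String × String × String)) : Prop := out = features2visible_py_alt features
instance (features : List String) (out : List (String × String × String)) : Decidable (Spec_features2visible_py features out) := by unfold Spec_features2visible_py; infer_instance

-- ===== CLAIM (what is proved, stated in full; the proofs are below) =====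
def Claim_equal_features2visible_py : Prop := ∀ (features : List String), Dom_features2visible_py features → Spec_features2visible_py features (features2visible_py features)

-- ===== LEMMAS AND PROOFS =====

theorem pvDouble_length_ge (l : List String) (n : Nat) (hl : l ≠ []) :
    n ≤ (pvDouble l n).length := by
  fun_induction pvDouble l n with
  | case1 l h ih =>
      exact ih (by simpa using hl)
  | case2 l h =>
      rcases not_and_or.mp h with h1 | h2
      · exact absurd hl (by simpa using h1)
      · omega

theorem pvDouble_getElem? (l : List String) (n : Nat) (hl : l ≠ []) (i : Nat)
    (hi : i < (pvDouble l n).length) :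
    (pvDouble l n)[i]? = l[i % l.length]? := by
  fun_induction pvDouble l n with
  | case1 l h ih =>
      have hl0 : 0 < l.length := List.length_pos_iff.mpr hl
      have := ih (by simpa using hl) hi
      rw [this]
      have hlen : (l ++ l).length = 2 * l.length := by
        simp [List.length_append]; omega
      have hmod : i % (l ++ l).length % l.length = i % l.length := by
        rw [hlen]; exact Nat.mod_mod_of_dvd i ⟨2, by ring⟩
      have hj : i % (l ++ l).length < 2 * l.length := by
        rw [← hlen]; exact Nat.mod_lt _ (by rw [hlen]; omega)
      -- (l ++ l)[j]? = l[j % len]? for j < 2*len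
      rcases Nat.lt_or_ge (i % (l ++ l).length) l.length with hc | hc
      · rw [List.getElem?_append_left hc, ← hmod, Nat.mod_eq_of_lt hc]
      · rw [List.getElem?_append_right hc, ← hmod,
          Nat.mod_eq_sub_mod hc]
        have : (i % (l ++ l).length - l.length) < l.length := by omega
        rw [Nat.mod_eq_of_lt this]
  | case2 l h =>
      have : i < l.length := hi
      rw [Nat.mod_eq_of_lt this]

theorem pv_list_eq (features : List String) :
    features.zip ((pvDouble pvShapes features.length).zip (pvDouble pvColors features.length)) =
      (PySem.List.enumerate features 0).map
        (fun p => (p.2,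
          (PySem.List.pyGetD pvShapes (PySem.Int.mod p.1 (pvShapes.length : Int)) "",
           PySem.List.pyGetD pvColors (PySem.Int.mod p.1 (pvColors.length : Int)) ""))) := by
  set n := features.length with hn
  have hsne : pvShapes ≠ [] := by decide
  have hcne : pvColors ≠ [] := by decide
  have hslen : n ≤ (pvDouble pvShapes n).length := pvDouble_length_ge _ _ hsne
  have hclen : n ≤ (pvDouble pvColors n).length := pvDouble_length_ge _ _ hcne
  apply List.ext_getElem?
  intro k
  rcases Nat.lt_or_ge k n with hk | hk
  · have hks : k < (pvDouble pvShapes n).length := by omega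
    have hkc : k < (pvDouble pvColors n).length := by omega
    have hzlen : k < ((pvDouble pvShapes n).zip (pvDouble pvColors n)).length := by
      simp [List.length_zip]; omega
    have hfull : k < (features.zip ((pvDouble pvShapes n).zip (pvDouble pvColors n))).length := by
      simp [List.length_zip]; omega
    rw [List.getElem?_eq_getElem hfull, List.getElem_zip, List.getElem_zip]
    rw [List.getElem?_map, PySem.List.getElem?_enumerate,
        List.getElem?_eq_getElem (by omega : k < features.length)]
    have hS : (pvDouble pvShapes n)[k] = pvShapes[k % 13]'(by
        have : k % 13 < 13 := Nat.mod_lt _ (by omega)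
        simpa [pvShapes] using this) := by
      have h1 := pvDouble_getElem? pvShapes n hsne k hks
      have h2 : (pvDouble pvShapes n)[k]? = some (pvDouble pvShapes n)[k] :=
        List.getElem?_eq_getElem hks
      have h13 : pvShapes.length = 13 := by decide
      rw [h2, h13] at h1
      have hm : k % 13 < pvShapes.length := by rw [h13]; exact Nat.mod_lt _ (by omega)
      rw [List.getElem?_eq_getElem hm] at h1
      exact Option.some.inj h1
    have hC : (pvDouble pvColors n)[k] = pvColors[k % 18]'(by
        have : k % 18 < 18 := Nat.mod_lt _ (by omega)
        simpa [pvColors] using this) := by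
      have h1 := pvDouble_getElem? pvColors n hcne k hkc
      have h2 : (pvDouble pvColors n)[k]? = some (pvDouble pvColors n)[k] :=
        List.getElem?_eq_getElem hkc
      have h18 : pvColors.length = 18 := by decide
      rw [h2, h18] at h1
      have hm : k % 18 < pvColors.length := by rw [h18]; exact Nat.mod_lt _ (by omega)
      rw [List.getElem?_eq_getElem hm] at h1
      exact Option.some.inj h1
    simp only [Option.map_some]
    congr 1
    refine Prod.ext rfl (Prod.ext ?_ ?_)
    · show (pvDouble pvShapes n)[k] = _
      rw [hS]
      have hmod : PySem.Int.mod ((0 : Int) + k) (pvShapes.length : Int) = ((k % 13 : Nat) : Int) := by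
        show PySem.Int.mod ((0 : Int) + k) (13 : Int) = _
        rw [zero_add]
        have : PySem.Int.mod (k : Int) (13 : Int) = (k : Int) % 13 := by
          simp [PySem.Int.mod, Int.fmod_eq_emod]
        rw [this]; push_cast; rfl
      rw [hmod, PySem.List.pyGetD_natCast]
      have : k % 13 < pvShapes.length := by
        have h13 : pvShapes.length = 13 := by decide
        rw [h13]; exact Nat.mod_lt _ (by omega)
      rw [List.getD_eq_getElem _ _ this]
    · show (pvDouble pvColors n)[k] = _
      rw [hC]
      have hmod : PySem.Int.mod ((0 : Int) + k) (pvColors.length : Int) = ((k % 18 : Nat) : Int) := by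
        show PySem.Int.mod ((0 : Int) + k) (18 : Int) = _
        rw [zero_add]
        have : PySem.Int.mod (k : Int) (18 : Int) = (k : Int) % 18 := by
          simp [PySem.Int.mod, Int.fmod_eq_emod]
        rw [this]; push_cast; rfl
      rw [hmod, PySem.List.pyGetD_natCast]
      have : k % 18 < pvColors.length := by
        have h18 : pvColors.length = 18 := by decide
        rw [h18]; exact Nat.mod_lt _ (by omega)
      rw [List.getD_eq_getElem _ _ this]
  · have h1 : (features.zip ((pvDouble pvShapes n).zip (pvDouble pvColors n)))[k]? = none := by
      apply List.getElem?_eq_none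
      simp [List.length_zip]; omega
    rw [h1]
    symm
    apply List.getElem?_eq_none
    simpa [PySem.List.length_enumerate] using hk

-- ===== VERDICT (by name: the statement is the Claim_ definition above) =====
theorem features2visible_py_spec : Claim_equal_features2visible_py := by
  intro features _
  show features2visible_py features = features2visible_py_alt features
  simp only [features2visible_py, features2visible_py_alt, pv_list_eq, List.foldl_map]
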